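-- pv_equiv track=rewrite | github.com/emiconpar/envdiff | envdiff/tagger.py | tag_keys
-- ===== SOURCE A (Python) =====
-- from typing import Dict, List, Optional
--
-- def tag_keys(
--     env: Dict[str, str],
--     tag_map: Dict[str, List[str]],
-- ) -> Dict[str, List[str]]:
--     """Return a mapping of key -> list of tags assigned to it.
--
--     Args:
--         env: The environment dict whose keys will be tagged.
--         tag_map: A dict of {tag_name: [key1, key2, ...]} defining which keys
--                  belong to each tag.
--
--     Returns:
--         A dict of {key: [tag, ...]} for every key that appears in *env*.
--         Keys with no matching tags receive an empty list.
--     """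
--     result: Dict[str, List[str]] = {key: [] for key in env}
--     for tag, keys in tag_map.items():
--         for key in keys:
--             if key in result:
--                 result[key].append(tag)
--     return result
-- ===== SOURCE B (Python) =====
-- def tag_keys(env, tag_map):
--     """Inverted traversal: for each env key, scan tag_map and collect every
--     tag whose key list mentions it (once per occurrence, in tag_map order)."""
--     return {
--         key: [tag for tag, keys in tag_map.items() for k in keys if k == key]
--         for key in env
--     }
-- ===== Notes on version B (the rewrite author's own statement) =====
-- stated objective: simpler
-- what changed: Replaces A's mutable index (pre-built key->[] dict updated by pushing tags while iterating tag_map) with a single dict comprehension that, for each env key, gathers its tags by scanning tag_map; no mutation, traversal inverted.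
import Mathlib
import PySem

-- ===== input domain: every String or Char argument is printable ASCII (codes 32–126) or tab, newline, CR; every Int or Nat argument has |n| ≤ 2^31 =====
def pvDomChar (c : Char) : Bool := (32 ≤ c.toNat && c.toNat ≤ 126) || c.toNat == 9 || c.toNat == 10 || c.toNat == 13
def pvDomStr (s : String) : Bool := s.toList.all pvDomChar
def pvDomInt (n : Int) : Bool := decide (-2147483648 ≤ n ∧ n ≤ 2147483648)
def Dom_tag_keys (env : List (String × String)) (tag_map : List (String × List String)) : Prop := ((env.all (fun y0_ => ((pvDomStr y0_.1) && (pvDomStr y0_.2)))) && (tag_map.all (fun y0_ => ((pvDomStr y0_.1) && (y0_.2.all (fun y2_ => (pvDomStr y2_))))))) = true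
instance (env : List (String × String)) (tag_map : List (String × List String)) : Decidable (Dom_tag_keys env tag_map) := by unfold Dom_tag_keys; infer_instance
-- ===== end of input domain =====

-- A builds a key->[] dict and pushes tags into it while iterating tag_map; B inverts the
-- traversal: one comprehension that, per env key, collects its tags by scanning tag_map (simpler, no mutation).


-- ===== PORT A =====
def tag_keys (env : List (String × String)) (tag_map : List (String × List String)) : List (String × List String) :=
  -- result = {key: [] for key in env}
  let result0 : PySem.Dict String (List String) :=
    (env.map (·.1)).foldl (fun d key => d.insert key []) PySem.Dict.empty
  -- for tag, keys in tag_map.items(): for key in keys: if key in result: result[key].append(tag)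
  let result : PySem.Dict String (List String) :=
    ((PySem.Dict.ofList tag_map).items).foldl
      (fun d p => p.2.foldl
        (fun d key => if d.contains key then d.modify key [] (fun l => l ++ [p.1]) else d) d)
      result0
  result.items

-- ===== PORT B =====
def tag_keys_alt (env : List (String × String)) (tag_map : List (String × List String)) : List (String × List String) :=
  let tm := (PySem.Dict.ofList tag_map).items
  (PySem.List.dedup (env.map (·.1))).map
    (fun key => (key, tm.flatMap (fun p => (p.2.filter (fun k => k == key)).map (fun _ => p.1))))

-- ===== PRECONDITION & SPEC =====
def Spec_tag_keys (env : List (String × String)) (tag_map : List (String × List String)) (out : List (String × List String)) : Prop := out = tag_keys_alt env tag_map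
instance (env : List (String × String)) (tag_map : List (String × List String)) (out : List (String × List String)) : Decidable (Spec_tag_keys env tag_map out) := by unfold Spec_tag_keys; infer_instance

-- ===== CLAIM (what is proved, stated in full; the proofs are below) =====
def Claim_equal_tag_keys : Prop := ∀ (env : List (String × String)) (tag_map : List (String × List String)), Dom_tag_keys env tag_map → Spec_tag_keys env tag_map (tag_keys env tag_map)


-- ===== LEMMAS AND PROOFS =====

-- the inner loop "for key in keys: if key in result: result[key].append(tag)" never changes the key list
theorem pv_inner_keys (KS : List String) (tag : String) (d : PySem.Dict String (List String)) :
    (KS.foldl (fun d key => if d.contains key then d.modify key [] (fun l => l ++ [tag]) else d) d).keys = d.keys := by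
  induction KS generalizing d with
  | nil => rfl
  | cons k KS ih =>
    simp only [List.foldl_cons]
    rw [ih]
    by_cases h : d.contains k = true
    · simp [h, PySem.Dict.keys_modify, PySem.Dict.keys_insert_of_contains _ _ h]
    · simp [h]

theorem pv_inner_contains (KS : List String) (tag : String) (d : PySem.Dict String (List String)) (key : String) :
    (KS.foldl (fun d key => if d.contains key then d.modify key [] (fun l => l ++ [tag]) else d) d).contains key = d.contains key := by
  rw [PySem.Dict.contains_eq_decide_mem_keys, PySem.Dict.contains_eq_decide_mem_keys, pv_inner_keys]

-- effect of the inner loop on one entry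
theorem pv_inner_getD (KS : List String) (tag : String) (d : PySem.Dict String (List String)) (key : String) :
    (KS.foldl (fun d key => if d.contains key then d.modify key [] (fun l => l ++ [tag]) else d) d).getD key []
      = d.getD key [] ++ (if d.contains key then (KS.filter (fun k => k == key)).map (fun _ => tag) else []) := by
  induction KS generalizing d with
  | nil => simp
  | cons k KS ih =>
    simp only [List.foldl_cons]
    rw [ih]
    by_cases hk : k = key
    · subst hk
      by_cases hc : d.contains k = true
      · have hcont : (d.modify k [] (fun l => l ++ [tag])).contains k = d.contains k := by
          rw [PySem.Dict.contains_eq_decide_mem_keys, PySem.Dict.contains_eq_decide_mem_keys,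
            PySem.Dict.keys_modify, PySem.Dict.keys_insert_of_contains _ _ hc]
        simp [hc, hcont, List.append_assoc]
      · simp [hc]
    · have hk' : ¬ key = k := fun h => hk h.symm
      have hfilter : (List.filter (fun a => a == key) (k :: KS)) = KS.filter (fun a => a == key) := by
        simp [hk]
      by_cases hc : d.contains k = true
      · have hcont : (d.modify k [] (fun l => l ++ [tag])).contains key = d.contains key := by
          rw [PySem.Dict.contains_eq_decide_mem_keys, PySem.Dict.contains_eq_decide_mem_keys,
            PySem.Dict.keys_modify, PySem.Dict.keys_insert_of_contains _ _ hc]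
        simp [hc, hcont, hfilter, PySem.Dict.getD_modify, hk']
      · simp [hc, hfilter]

-- effect of the whole tag_map loop on one entry
theorem pv_outer_getD (tm : List (String × List String)) (d : PySem.Dict String (List String)) (key : String) :
    (tm.foldl (fun d p => p.2.foldl
        (fun d key => if d.contains key then d.modify key [] (fun l => l ++ [p.1]) else d) d) d).getD key []
      = d.getD key [] ++ (if d.contains key then
          tm.flatMap (fun p => (p.2.filter (fun k => k == key)).map (fun _ => p.1)) else []) := by
  induction tm generalizing d with
  | nil => simp
  | cons p tm ih =>
    simp only [List.foldl_cons]
    rw [ih, pv_inner_contains, pv_inner_getD]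
    by_cases hc : d.contains key = true
    · simp [hc, List.flatMap_cons, List.append_assoc]
    · simp [hc]

theorem pv_outer_keys (tm : List (String × List String)) (d : PySem.Dict String (List String)) :
    (tm.foldl (fun d p => p.2.foldl
        (fun d key => if d.contains key then d.modify key [] (fun l => l ++ [p.1]) else d) d) d).keys = d.keys := by
  induction tm generalizing d with
  | nil => rfl
  | cons p tm ih => simp only [List.foldl_cons]; rw [ih, pv_inner_keys]

-- the initial comprehension {key: [] for key in env}: every stored value is []
theorem pv_init_getD (ks : List String) (d : PySem.Dict String (List String)) (key : String)
    (h : d.getD key [] = []) :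
    (ks.foldl (fun d k => d.insert k []) d).getD key [] = [] := by
  induction ks generalizing d with
  | nil => exact h
  | cons k ks ih =>
    simp only [List.foldl_cons]
    apply ih
    rw [PySem.Dict.getD_insert]
    split <;> simp [h]

-- ===== VERDICT (by name: the statement is the Claim_ definition above) =====
theorem tag_keys_spec : Claim_equal_tag_keys := by
  intro env tag_map _
  unfold Spec_tag_keys tag_keys tag_keys_alt
  set ks := env.map (fun p => p.1) with hks
  set tm := (PySem.Dict.ofList tag_map).items with htm
  set d0 : PySem.Dict String (List String) := ks.foldl (fun d key => d.insert key []) PySem.Dict.empty with hd0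
  have hkeys0 : d0.keys = PySem.Set.ofList ks := by
    rw [hd0, PySem.Dict.keys_foldl_insert ks (fun _ _ => ([] : List String))]
    rfl
  have hnd0 : d0.keys.Nodup := by
    rw [hd0]
    exact PySem.Dict.nodup_keys_foldl_insert ks (fun _ _ => ([] : List String)) _ PySem.Dict.nodup_keys_empty
  set F := tm.foldl (fun d p => p.2.foldl
      (fun d key => if d.contains key then d.modify key [] (fun l => l ++ [p.1]) else d) d) d0 with hF
  have hkeysF : F.keys = PySem.Set.ofList ks := by rw [hF, pv_outer_keys, hkeys0]
  have hndF : F.keys.Nodup := by rw [hkeysF, ← hkeys0]; exact hnd0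
  rw [PySem.Dict.items_eq_map_keys F hndF [], hkeysF, PySem.List.dedup_eq_ofList]
  apply List.map_congr_left
  intro k hkmem
  have hc : d0.contains k = true := by
    rw [PySem.Dict.contains_eq_decide_mem_keys, hkeys0]
    simpa using hkmem
  rw [hF, pv_outer_getD, hc, pv_init_getD ks PySem.Dict.empty k (by simp [PySem.Dict.getD_empty])]
  simp
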